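-- pv_equiv track=rewrite | github.com/miliar/Code_Jam_Webscraper | solutions_python/Problem_200/2870.py | whereToSort
-- ===== SOURCE A (Python) =====
-- def whereToSort(m):
--     listM = list(m)
--     for i in range(1,len(listM)):
--         if (int(listM[i]) < int(listM[i-1])):
--             for j in range(1,i):
--                 if (int(listM[i-(j)]) != int(listM[i-(j+1)])):
--                     pos = i-j+1
--                     return pos
--             return 1
--     return 0
-- ===== SOURCE B (Python) =====
-- def whereToSort(m):
--     runStart = 0
--     for i in range(1, len(m)):
--         cur = int(m[i])
--         prev = int(m[i - 1])
--         if cur > prev: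
--             runStart = i
--         elif cur < prev:
--             return runStart + 1
--     return 0
-- ===== Notes on version B (the rewrite author's own statement) =====
-- stated objective: simpler
-- what changed: B replaces A's inner backward backtracking loop with a single forward pass that maintains runStart, the start index of the current run of equal digits, returning runStart+1 at the first descent.
import Mathlib
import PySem

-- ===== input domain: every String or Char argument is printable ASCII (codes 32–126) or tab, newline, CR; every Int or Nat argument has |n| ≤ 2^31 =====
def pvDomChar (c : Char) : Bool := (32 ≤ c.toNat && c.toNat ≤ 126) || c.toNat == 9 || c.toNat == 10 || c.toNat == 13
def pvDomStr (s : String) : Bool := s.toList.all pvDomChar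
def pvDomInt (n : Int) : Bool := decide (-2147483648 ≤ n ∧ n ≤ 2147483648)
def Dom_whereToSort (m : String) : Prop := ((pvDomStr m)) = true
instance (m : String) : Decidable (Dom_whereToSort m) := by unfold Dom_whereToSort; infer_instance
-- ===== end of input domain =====

-- B: one forward pass keeping runStart (start of the current run of equal digits) instead of
-- A's inner backward backtracking loop; simpler, same result.

-- int(m[i]) on a single character: value of the digit (Pre_ guarantees every converted char is a digit)
def pvDigitAt (cs : List Char) (i : Int) : Int :=
  ((PySem.List.pyGet? cs i).bind (fun c => PySem.Int.ofChars? [c])).getD 0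

-- ===== PORT A =====
-- inner loop: for j in range(1, i): if int(m[i-j]) != int(m[i-j-1]): return i-j+1 ; else return 1
def whereToSortInner (cs : List Char) (i : Int) : List Int → Int
  | [] => 1
  | j :: js =>
    if pvDigitAt cs (i - j) ≠ pvDigitAt cs (i - (j + 1)) then i - j + 1
    else whereToSortInner cs i js

-- outer loop: for i in range(1, len(m)): if int(m[i]) < int(m[i-1]): <inner loop> ; return 0
def whereToSortOuter (cs : List Char) : List Int → Int
  | [] => 0
  | i :: is =>
    if pvDigitAt cs i < pvDigitAt cs (i - 1) then whereToSortInner cs i (PySem.List.pyRange 1 i 1)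
    else whereToSortOuter cs is

def whereToSort (m : String) : Int :=
  whereToSortOuter m.toList (PySem.List.pyRange 1 (m.toList.length : Int) 1)

-- ===== PORT B =====
def whereToSortGo (cs : List Char) (runStart : Int) : List Int → Int
  | [] => 0
  | i :: is =>
    let cur := pvDigitAt cs i
    let prev := pvDigitAt cs (i - 1)
    if cur > prev then whereToSortGo cs i is
    else if cur < prev then runStart + 1
    else whereToSortGo cs runStart is

def whereToSort_alt (m : String) : Int :=
  whereToSortGo m.toList 0 (PySem.List.pyRange 1 (m.toList.length : Int) 1)

-- ===== PRECONDITION & SPEC =====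
-- Pre_ excludes exactly the inputs on which Python A raises ValueError: those where a non-digit
-- character is reached before (or at) the first descent, i.e. strings of length ≥ 2 that are not
-- all digits and whose leading digit run is non-decreasing.
def Pre_whereToSort (m : String) : Prop :=
  m.toList.length ≤ 1 ∨
  m.toList.takeWhile (fun c => '0' ≤ c && c ≤ '9') = m.toList ∨
  ¬ (m.toList.takeWhile (fun c => '0' ≤ c && c ≤ '9')).IsChain (· ≤ ·)
instance (m : String) : Decidable (Pre_whereToSort m) := by unfold Pre_whereToSort; infer_instance
def pvWitness_whereToSort : String := "120"

def Spec_whereToSort (m : String) (out : Int) : Prop := out = whereToSort_alt m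
instance (m : String) (out : Int) : Decidable (Spec_whereToSort m out) := by unfold Spec_whereToSort; infer_instance

-- ===== CLAIM (what is proved, stated in full; the proofs are below) =====
def Claim_equal_whereToSort : Prop := ∀ (m : String), Dom_whereToSort m → Pre_whereToSort m → Spec_whereToSort m (whereToSort m)

-- ===== LEMMAS AND PROOFS =====

-- shifting every index of the inner loop by one leaves its result unchanged
lemma inner_shift (cs : List Char) (i : Int) (js : List Int) :
    whereToSortInner cs (i + 1) (js.map (· + 1)) = whereToSortInner cs i js := by
  induction js with
  | nil => rfl
  | cons j js ih =>
    simp only [List.map_cons, whereToSortInner]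
    have h1 : i + 1 - (j + 1) = i - j := by ring
    have h2 : i + 1 - (j + 1 + 1) = i - (j + 1) := by ring
    rw [h1, h2, ih]

lemma pyRange_shift (i : Int) (h : 1 ≤ i) :
    PySem.List.pyRange 2 (i + 1) 1 = (PySem.List.pyRange 1 i 1).map (· + 1) := by
  rw [PySem.List.pyRange_one, PySem.List.pyRange_one]
  have : (i + 1 - 2).toNat = (i - 1).toNat := by omega
  rw [this, List.map_map]
  exact List.map_congr_left (fun k _ => by simp; ring)

-- main loop invariant: whereToSortInner at position i returns runStart + 1
lemma main_loop (cs : List Char) (b : Int) : ∀ (i runStart : Int), 1 ≤ i →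
    whereToSortInner cs i (PySem.List.pyRange 1 i 1) = runStart + 1 →
    whereToSortGo cs runStart (PySem.List.pyRange i b 1) =
      whereToSortOuter cs (PySem.List.pyRange i b 1) := by
  have H : ∀ (n : Nat) (i runStart : Int), (b - i).toNat = n → 1 ≤ i →
      whereToSortInner cs i (PySem.List.pyRange 1 i 1) = runStart + 1 →
      whereToSortGo cs runStart (PySem.List.pyRange i b 1) =
        whereToSortOuter cs (PySem.List.pyRange i b 1) := by
    intro n
    induction n with
    | zero =>
      intro i runStart hn hi _
      rw [PySem.List.pyRange_one_eq_nil (by omega)]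
      rfl
    | succ n ih =>
      intro i runStart hn hi hinv
      rw [PySem.List.pyRange_one_cons (by omega)]
      show whereToSortGo cs runStart (i :: _) = whereToSortOuter cs (i :: _)
      simp only [whereToSortGo, whereToSortOuter]
      have hnext : PySem.List.pyRange 1 (i + 1) 1 = 1 :: PySem.List.pyRange 2 (i + 1) 1 :=
        PySem.List.pyRange_one_cons (by omega)
      rcases lt_trichotomy (pvDigitAt cs i) (pvDigitAt cs (i - 1)) with hlt | heq | hgt
      · rw [if_neg (by omega), if_pos hlt, if_pos hlt, hinv]
      · rw [if_neg (by omega), if_neg (by omega), if_neg (by omega)]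
        apply ih (i + 1) runStart (by omega) (by omega)
        rw [hnext]
        simp only [whereToSortInner]
        have h1 : i + 1 - 1 = i := by ring
        have h2 : i + 1 - (1 + 1) = i - 1 := by ring
        rw [h1, h2, if_neg (by simp [heq])]
        rw [pyRange_shift i hi]
        have := inner_shift cs i (PySem.List.pyRange 1 i 1)
        rw [this, hinv]
      · rw [if_pos hgt, if_neg (by omega)]
        apply ih (i + 1) i (by omega) (by omega)
        rw [hnext]
        simp only [whereToSortInner]
        have h1 : i + 1 - 1 = i := by ring
        have h2 : i + 1 - (1 + 1) = i - 1 := by ring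
        rw [h1, h2, if_pos (by omega)]
  exact fun i runStart => H (b - i).toNat i runStart rfl

-- ===== VERDICT (by name: the statement is the Claim_ definition above) =====
theorem whereToSort_spec : Claim_equal_whereToSort := by
  intro m _ _
  unfold Spec_whereToSort whereToSort whereToSort_alt
  symm
  apply main_loop m.toList _ 1 0 le_rfl
  rw [PySem.List.pyRange_one_eq_nil le_rfl]
  rfl
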